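-- pv_equiv track=rewrite | github.com/DimaDBRK/DI-Bootcamp | Week2/Day4/DailyChallenge/scrypt.py | encode_option2
-- ===== SOURCE A (Python) =====
-- def encode_option2(in_list):
--     res_string = ""
--     space = ""
--     symb_qty = 0
--
--     for i in range(len(in_list[0])):
--         for j in in_list:
--             if j[i].isalpha():
--                 res_string += space
--                 space = ""
--                 symb_qty = 0
--                 res_string += j[i]
--
--             else:
--                 symb_qty += 1
--                 if len(res_string) > 0 and symb_qty >= 2:
--                     space = " "
--     return res_string
-- ===== SOURCE B (Python) =====
-- def encode_option2(in_list):
--     # build the column-major character stream, then scan it run by run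
--     seq = [row[i] for i in range(len(in_list[0])) for row in in_list]
--     pieces = []
--     pending = False
--     k = 0
--     n = len(seq)
--     while k < n:
--         a = seq[k].isalpha()
--         j = k
--         while j < n and seq[j].isalpha() == a:
--             j += 1
--         if a:
--             if pending:
--                 pieces.append(" ")
--             pending = False
--             pieces.extend(seq[k:j])
--         elif pieces and j - k >= 2:
--             pending = True
--         k = j
--     return "".join(pieces)
-- ===== Notes on version B (the rewrite author's own statement) =====
-- stated objective: idiomatic
-- what changed: Replaces A's per-character state machine (space/symb_qty counters updated inside a nested index loop with string concatenation) by first materialising the column-major character stream and then scanning it run by run (run-length grouping), arming a pending space per non-alpha run of length >= 2 and joining a list of pieces.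
import Mathlib
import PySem

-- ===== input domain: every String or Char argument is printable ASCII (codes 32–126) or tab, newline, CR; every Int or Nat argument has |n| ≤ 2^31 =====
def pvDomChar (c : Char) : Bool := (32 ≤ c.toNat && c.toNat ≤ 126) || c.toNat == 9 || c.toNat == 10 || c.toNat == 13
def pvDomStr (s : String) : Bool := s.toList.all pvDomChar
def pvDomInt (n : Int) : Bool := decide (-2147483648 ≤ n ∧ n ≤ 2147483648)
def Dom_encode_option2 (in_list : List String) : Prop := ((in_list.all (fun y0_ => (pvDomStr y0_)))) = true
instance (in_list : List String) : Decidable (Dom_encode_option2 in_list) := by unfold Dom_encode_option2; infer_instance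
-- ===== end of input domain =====

-- B replaces A's per-character space/counter state machine by building the column-major
-- stream and scanning it run by run (run-length grouping); equivalence proved on Pre_.

-- ===== PORT A =====
-- loop body of A: state (res_string, space, symb_qty), one character j[i]
def stepA (st : List Char × List Char × Int) (c : Char) : List Char × List Char × Int :=
  let (res, space, q) := st
  if PySem.Chars.isalpha c then
    (res ++ space ++ [c], [], 0)
  else
    let q := q + 1
    if 0 < res.length ∧ 2 ≤ q then (res, [' '], q) else (res, space, q)

def encode_option2 (in_list : List String) : String :=
  -- in_list[0] raises on empty in_list; excluded by Pre_, headD "" is exact on Pre_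
  let first := in_list.headD ""
  let st :=
    (PySem.List.pyRange 0 (first.toList.length : Int) 1).foldl
      (fun st i =>
        in_list.foldl
          (fun st j => stepA st (PySem.List.pyGetD j.toList i ' ')) -- j[i]; in range on Pre_
          st)
      (([] : List Char), ([] : List Char), (0 : Int))
  String.mk st.1

-- ===== PORT B =====
-- the column-major character stream: seq = [row[i] for i in range(len(in_list[0])) for row in in_list]
def bStream (in_list : List String) : List Char :=
  (PySem.List.pyRange 0 (((in_list.headD "").toList.length : Int)) 1).flatMap
    (fun i => in_list.map (fun row => PySem.List.pyGetD row.toList i ' '))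

-- the run-by-run scan: take one maximal run of equal isalpha, handle it, continue
def bRuns (seq : List Char) (pieces : List Char) (pending : Bool) : List Char :=
  match seq with
  | [] => pieces
  | c :: rest =>
    let a := PySem.Chars.isalpha c
    let run := rest.takeWhile (fun d => PySem.Chars.isalpha d == a)
    let rest' := rest.dropWhile (fun d => PySem.Chars.isalpha d == a)
    if a then
      bRuns rest' (pieces ++ (if pending then [' '] else []) ++ c :: run) false
    else
      bRuns rest' pieces (if pieces ≠ [] ∧ 2 ≤ (c :: run).length then true else pending)
termination_by seq.length
decreasing_by
  all_goals
    simp only [List.length_cons]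
    exact Nat.lt_succ_of_le (List.length_dropWhile_le _ _)

def encode_option2_alt (in_list : List String) : String :=
  String.mk (bRuns (bStream in_list) [] false)

-- ===== PRECONDITION & SPEC =====
-- Pre_ excludes exactly the inputs where Python A raises IndexError:
-- the empty list (in_list[0]) and rows shorter than the first row (j[i]).
def Pre_encode_option2 (in_list : List String) : Prop :=
  in_list ≠ [] ∧ ∀ s ∈ in_list, (in_list.headD "").toList.length ≤ s.toList.length
instance (in_list : List String) : Decidable (Pre_encode_option2 in_list) := by
  unfold Pre_encode_option2; infer_instance

def pvWitness_encode_option2 : List String := ["h..e", "l!!l", "o..."]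

def Spec_encode_option2 (in_list : List String) (out : String) : Prop := out = encode_option2_alt in_list
instance (in_list : List String) (out : String) : Decidable (Spec_encode_option2 in_list out) := by unfold Spec_encode_option2; infer_instance

-- ===== CLAIM (what is proved, stated in full; the proofs are below) =====
def Claim_equal_encode_option2 : Prop := ∀ (in_list : List String), Dom_encode_option2 in_list → Pre_encode_option2 in_list → Spec_encode_option2 in_list (encode_option2 in_list)

-- ===== LEMMAS AND PROOFS =====

-- A's nested loops are one foldl of stepA over the column-major stream
theorem foldl_flatten (idxs : List Int) (in_list : List String)
    (st : List Char × List Char × Int) :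
    idxs.foldl
      (fun st i => in_list.foldl (fun st j => stepA st (PySem.List.pyGetD j.toList i ' ')) st)
      st
    = (idxs.flatMap (fun i => in_list.map (fun row => PySem.List.pyGetD row.toList i ' '))).foldl
        stepA st := by
  induction idxs generalizing st with
  | nil => rfl
  | cons i is ih => simp [List.flatMap_cons, List.foldl_append, List.foldl_map, ih]

theorem alphaRun (l : List Char) (res : List Char)
    (h : ∀ c ∈ l, PySem.Chars.isalpha c = true) :
    l.foldl stepA (res, [], 0) = (res ++ l, [], 0) := by
  induction l generalizing res with
  | nil => simp
  | cons c cs ih =>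
    have hc := h c (by simp)
    simp only [List.foldl_cons]
    rw [show stepA (res, [], 0) c = (res ++ [] ++ [c], [], 0) by simp [stepA, hc]]
    rw [ih _ (fun d hd => h d (by simp [hd]))]
    simp

theorem nonAlphaRun (l : List Char) (res sp : List Char) (q : Int) (hq : 0 ≤ q)
    (h : ∀ c ∈ l, PySem.Chars.isalpha c = false) :
    l.foldl stepA (res, sp, q)
      = (res,
         (if 0 < res.length ∧ 2 ≤ q + (l.length : Int) ∧ 1 ≤ l.length then [' '] else sp),
         q + (l.length : Int)) := by
  induction l generalizing sp q with
  | nil => simp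
  | cons c cs ih =>
    have hc := h c (by simp)
    simp only [List.foldl_cons]
    rw [show stepA (res, sp, q) c
        = (if 0 < res.length ∧ 2 ≤ q + 1 then (res, [' '], q + 1) else (res, sp, q + 1)) by
      simp [stepA, hc]]
    have hcs : ∀ d ∈ cs, PySem.Chars.isalpha d = false := fun d hd => h d (by simp [hd])
    by_cases h1 : 0 < res.length ∧ 2 ≤ q + 1
    · rw [if_pos h1, ih _ (q + 1) (by omega) hcs, ite_self]
      have h2 : 0 < res.length ∧ 2 ≤ q + ((c :: cs).length : Int) ∧ 1 ≤ (c :: cs).length := by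
        refine ⟨h1.1, ?_, by simp⟩
        have := h1.2
        simp only [List.length_cons]
        push_cast
        omega
      rw [if_pos h2]
      simp only [List.length_cons, Prod.mk.injEq]
      refine ⟨trivial, trivial, by push_cast; ring⟩
    · rw [if_neg h1, ih _ (q + 1) (by omega) hcs]
      simp only [List.length_cons, Prod.mk.injEq]
      refine ⟨trivial, ?_, by push_cast; ring⟩
      have hiff : (0 < res.length ∧ 2 ≤ q + 1 + (cs.length : Int) ∧ 1 ≤ cs.length)
          ↔ (0 < res.length ∧ 2 ≤ q + ((cs.length : Int) + 1) ∧ 1 ≤ cs.length + 1) := by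
        rcases Nat.eq_zero_or_pos cs.length with h0 | h0
        · simp only [h0]
          push_cast
          constructor
          · rintro ⟨_, _, hb⟩; omega
          · rintro ⟨a, b, _⟩; exact absurd ⟨a, by omega⟩ h1
        · constructor
          · rintro ⟨a, b, _⟩; exact ⟨a, by omega, by omega⟩
          · rintro ⟨a, b, _⟩; exact ⟨a, by omega, by omega⟩
      simp only [Nat.cast_add, Nat.cast_one]
      exact if_congr hiff rfl rfl

theorem head_dropWhile_false {p : Char → Bool} (l : List Char) (c : Char) (rest : List Char)
    (h : l.dropWhile p = c :: rest) : p c = false := by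
  induction l with
  | nil => simp at h
  | cons x xs ih =>
    by_cases hx : p x
    · rw [List.dropWhile_cons_of_pos hx] at h; exact ih h
    · rw [List.dropWhile_cons_of_neg hx] at h
      cases h; simpa using hx

theorem bRuns_eq_foldl (n : Nat) : ∀ (seq : List Char), seq.length ≤ n →
    ∀ (pieces : List Char) (pending : Bool) (q : Int), 0 ≤ q →
    (∀ c rest, seq = c :: rest → PySem.Chars.isalpha c = false → q = 0) →
    bRuns seq pieces pending
      = (seq.foldl stepA (pieces, (if pending then [' '] else []), q)).1 := by
  induction n with
  | zero =>
    intro seq hlen pieces pending q _ _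
    have h0 : seq = [] := List.length_eq_zero_iff.mp (Nat.le_zero.mp hlen)
    subst h0
    simp [bRuns]
  | succ n ih =>
    intro seq hlen pieces pending q hq hhead
    match seq with
    | [] => simp [bRuns]
    | c :: rest =>
      by_cases ha : PySem.Chars.isalpha c = true
      · -- alpha run
        have hstep : bRuns (c :: rest) pieces pending
            = bRuns (rest.dropWhile (fun d => PySem.Chars.isalpha d == PySem.Chars.isalpha c))
                (pieces ++ (if pending then [' '] else [])
                  ++ c :: rest.takeWhile (fun d => PySem.Chars.isalpha d == PySem.Chars.isalpha c))
                false := by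
          rw [bRuns]
          simp only [ha, if_true]
        rw [hstep]
        set p : Char → Bool := fun d => PySem.Chars.isalpha d == PySem.Chars.isalpha c with hp
        have hrestlen : (rest.dropWhile p).length ≤ n := by
          have := List.length_dropWhile_le p rest
          simp only [List.length_cons] at hlen
          omega
        rw [ih _ hrestlen _ false 0 le_rfl (fun _ _ _ _ => rfl)]
        have hrun : ∀ d ∈ rest.takeWhile p, PySem.Chars.isalpha d = true := by
          intro d hd
          have := List.mem_takeWhile_imp hd
          rw [hp] at this
          simp only [ha, beq_iff_eq] at this
          exact this
        conv_rhs => rw [show c :: rest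
            = (c :: rest.takeWhile p) ++ rest.dropWhile p by
          rw [List.cons_append, List.takeWhile_append_dropWhile]]
        rw [List.foldl_append]
        simp only [List.foldl_cons]
        rw [show stepA (pieces, (if pending then [' '] else []), q) c
            = (pieces ++ (if pending then [' '] else []) ++ [c], [], 0) by simp [stepA, ha]]
        rw [alphaRun _ _ hrun]
        simp
      · -- non-alpha run
        have ha' : PySem.Chars.isalpha c = false := by simpa using ha
        have hq0 : q = 0 := hhead c rest rfl ha'
        have hstep : bRuns (c :: rest) pieces pending
            = bRuns (rest.dropWhile (fun d => PySem.Chars.isalpha d == PySem.Chars.isalpha c))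
                pieces
                (if pieces ≠ [] ∧ 2 ≤ (c :: rest.takeWhile
                    (fun d => PySem.Chars.isalpha d == PySem.Chars.isalpha c)).length
                 then true else pending) := by
          rw [bRuns]
          simp only [ha', Bool.false_eq_true, if_false]
        rw [hstep]
        set p : Char → Bool := fun d => PySem.Chars.isalpha d == PySem.Chars.isalpha c with hp
        have hrestlen : (rest.dropWhile p).length ≤ n := by
          have := List.length_dropWhile_le p rest
          simp only [List.length_cons] at hlen
          omega
        rw [ih _ hrestlen _ _ (1 + ((rest.takeWhile p).length : Int)) (by positivity) ?alpha]
        case alpha =>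
          intro d drest hd hda
          exfalso
          have hf := head_dropWhile_false rest d drest hd
          simp [hp, hda, ha'] at hf
        have hrun : ∀ d ∈ c :: rest.takeWhile p, PySem.Chars.isalpha d = false := by
          intro d hd
          rcases List.mem_cons.mp hd with h | h
          · subst h; exact ha'
          · have := List.mem_takeWhile_imp h
            rw [hp] at this
            simp only [ha', beq_iff_eq] at this
            exact this
        conv_rhs => rw [show c :: rest
            = (c :: rest.takeWhile p) ++ rest.dropWhile p by
          rw [List.cons_append, List.takeWhile_append_dropWhile]]
        rw [List.foldl_append]
        rw [nonAlphaRun _ _ _ q hq hrun]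
        subst hq0
        have hstate : ((pieces,
              (if (if pieces ≠ [] ∧ 2 ≤ (c :: rest.takeWhile p).length then true else pending)
               then ([' '] : List Char) else []),
              1 + ((rest.takeWhile p).length : Int)) : List Char × List Char × Int)
            = (pieces,
               (if 0 < pieces.length ∧ 2 ≤ (0 : Int) + (((c :: rest.takeWhile p).length : Int))
                    ∧ 1 ≤ (c :: rest.takeWhile p).length
                then [' '] else (if pending then [' '] else [])),
               0 + ((c :: rest.takeWhile p).length : Int)) := by
          simp only [Prod.mk.injEq]
          refine ⟨trivial, ?_, by simp only [List.length_cons]; push_cast; ring⟩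
          by_cases hcnd : pieces ≠ [] ∧ 2 ≤ (c :: rest.takeWhile p).length
          · rw [if_pos hcnd]
            have hy : 0 < pieces.length ∧ 2 ≤ (0 : Int) + ((c :: rest.takeWhile p).length : Int)
                ∧ 1 ≤ (c :: rest.takeWhile p).length := by
              refine ⟨List.length_pos_iff.mpr hcnd.1, ?_, by simp⟩
              have h2 := hcnd.2
              simp only [List.length_cons] at h2 ⊢
              push_cast
              omega
            rw [if_pos hy]
            simp
          · rw [if_neg hcnd]
            have hn : ¬ (0 < pieces.length ∧ 2 ≤ (0 : Int) + ((c :: rest.takeWhile p).length : Int)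
                ∧ 1 ≤ (c :: rest.takeWhile p).length) := by
              rintro ⟨a, b, _⟩
              apply hcnd
              refine ⟨by intro e; subst e; simp at a, ?_⟩
              simp only [List.length_cons] at b ⊢
              push_cast at b
              omega
            rw [if_neg hn]
        exact congrArg (fun st => (List.foldl stepA st (rest.dropWhile p)).1) hstate

-- ===== VERDICT (by name: the statement is the Claim_ definition above) =====
theorem encode_option2_spec : Claim_equal_encode_option2 := by
  intro in_list _ _
  unfold Spec_encode_option2
  simp only [encode_option2, encode_option2_alt, bStream]
  rw [foldl_flatten]
  rw [bRuns_eq_foldl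
        ((PySem.List.pyRange 0 (((in_list.headD "").toList.length : Int)) 1).flatMap
          (fun i => in_list.map (fun row => PySem.List.pyGetD row.toList i ' '))).length
        _ le_rfl [] false 0 le_rfl (fun _ _ _ _ => rfl)]
  simp
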